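-- pv_equiv track=rewrite | github.com/lubovkatoloka/Staffing_Agent | staffing_agent/format_utils.py | compress_slash
-- ===== SOURCE A (Python) =====
-- def compress_slash(labels: list[str]) -> str:
--     """Display tier groups: T2, T3, T4 → ``T2/T3/T4`` (sorted)."""
--     order = []
--     seen: set[str] = set()
--     for raw in labels:
--         x = (raw or "").strip()
--         if not x or x in seen:
--             continue
--         seen.add(x)
--         order.append(x)
--
--     def _sort_key(s: str) -> tuple[int, str]:
--         if s == "T1":
--             return (10, s)
--         if s.startswith("T") and s[1:].isdigit():
--             return (20 + int(s[1:]), s)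
--         return (999, s)
--
--     order.sort(key=_sort_key)
--     return "/".join(order)
-- ===== SOURCE B (Python) =====
-- def compress_slash(labels: list[str]) -> str:
--     """Display tier groups: T2, T3, T4 -> ``T2/T3/T4`` (sorted)."""
--
--     def _sort_key(s: str) -> tuple[int, str]:
--         if s == "T1":
--             return (10, s)
--         if s.startswith("T") and s[1:].isdigit():
--             return (20 + int(s[1:]), s)
--         return (999, s)
--
--     # sort ALL cleaned labels first (no set), then collapse runs of equal
--     # adjacent strings in one pass tracking the previously emitted value
--     cleaned = sorted(
--         (x for x in ((raw or "").strip() for raw in labels) if x),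
--         key=_sort_key,
--     )
--     out: list[str] = []
--     prev = None
--     for x in cleaned:
--         if x != prev:
--             out.append(x)
--             prev = x
--     return "/".join(out)
-- ===== Notes on version B (the rewrite author's own statement) =====
-- stated objective: alternative
-- what changed: A dedups first via a seen-set while scanning and then sorts the distinct labels; B sorts the full cleaned list first (no set at all) and collapses runs of equal adjacent strings in a single prev-tracking pass, relying on the string tiebreaker in the sort key to make duplicates adjacent.
import Mathlib
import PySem

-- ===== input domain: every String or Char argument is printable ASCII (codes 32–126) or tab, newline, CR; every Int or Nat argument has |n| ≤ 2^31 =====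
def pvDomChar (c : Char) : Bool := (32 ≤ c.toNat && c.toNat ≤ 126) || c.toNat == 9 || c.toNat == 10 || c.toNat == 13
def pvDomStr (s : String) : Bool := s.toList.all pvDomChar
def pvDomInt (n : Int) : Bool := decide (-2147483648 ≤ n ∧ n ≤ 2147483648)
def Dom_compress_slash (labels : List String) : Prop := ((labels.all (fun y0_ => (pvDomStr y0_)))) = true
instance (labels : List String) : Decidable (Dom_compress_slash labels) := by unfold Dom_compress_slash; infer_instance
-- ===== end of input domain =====

-- B replaces A's scan-with-seen-set-then-sort by sort-everything-then-collapse-adjacent-runs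
-- (an alternative decomposition, not claimed faster).

-- shared sort key (_sort_key is the same helper in both Pythons); Python's tuple (int, str)
-- comparison is the lexicographic product order, modelled by Lex (Int × String)
def tierKey (s : String) : Lex (Int × String) :=
  if s = "T1" then toLex (10, s)
  else if PySem.Str.startswith s "T" && PySem.Str.strIsdigit (PySem.Str.slice s (some 1) none) then
    -- int(s[1:]) cannot raise here: s[1:] is a non-empty all-digit string
    toLex (20 + (PySem.Int.ofStr? (PySem.Str.slice s (some 1) none)).getD 0, s)
  else toLex (999, s)

-- ===== PORT A =====
-- one iteration of A's scan loop over (seen, order)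
def stepA (st : PySem.Set String × List String) (raw : String) :
    PySem.Set String × List String :=
  let x := PySem.Str.strip (if raw = "" then "" else raw)   -- (raw or "").strip()
  if x = "" ∨ PySem.Set.contains st.1 x then st
  else (PySem.Set.add st.1 x, st.2 ++ [x])

def compress_slash (labels : List String) : String :=
  let res := labels.foldl stepA (PySem.Set.empty, [])
  PySem.Str.join "/" (PySem.List.sorted res.2 tierKey false)

-- ===== PORT B =====
def compress_slash_alt (labels : List String) : String :=
  let cleaned := PySem.List.sorted
      ((labels.map (fun raw => PySem.Str.strip (if raw = "" then "" else raw))).filter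
        (fun x => x != "")) tierKey false
  let res := cleaned.foldl (fun (st : List String × Option String) x =>
      if some x ≠ st.2 then (st.1 ++ [x], some x) else st) (([] : List String), none)
  PySem.Str.join "/" res.1

-- ===== PRECONDITION & SPEC =====
def Spec_compress_slash (labels : List String) (out : String) : Prop := out = compress_slash_alt labels
instance (labels : List String) (out : String) : Decidable (Spec_compress_slash labels out) := by unfold Spec_compress_slash; infer_instance

-- ===== CLAIM (what is proved, stated in full; the proofs are below) =====
def Claim_equal_compress_slash : Prop := ∀ (labels : List String), Dom_compress_slash labels → Spec_compress_slash labels (compress_slash labels)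

-- ===== LEMMAS AND PROOFS =====

-- the key determines the string (its second component is the string itself)
theorem tierKey_injective : Function.Injective tierKey := by
  intro a b h
  have ha : (ofLex (tierKey a)).2 = a := by
    unfold tierKey; split_ifs <;> rfl
  have hb : (ofLex (tierKey b)).2 = b := by
    unfold tierKey; split_ifs <;> rfl
  rw [← ha, ← hb, h]

-- A's scan loop: seen and order hold the same list, and it is Set.ofList of the cleaned labels
theorem foldA_eq (ls : List String) (s : List String) :
    ls.foldl stepA (s, s)
    = (((ls.map (fun raw => PySem.Str.strip (if raw = "" then "" else raw))).filter
          (fun x => x != "")).foldl PySem.Set.add s,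
       ((ls.map (fun raw => PySem.Str.strip (if raw = "" then "" else raw))).filter
          (fun x => x != "")).foldl PySem.Set.add s) := by
  induction ls generalizing s with
  | nil => rfl
  | cons raw t ih =>
    rw [List.foldl_cons, List.map_cons, List.filter_cons]
    by_cases hx : PySem.Str.strip (if raw = "" then "" else raw) = ""
    · have h1 : stepA (s, s) raw = (s, s) := by
        simp only [stepA]; rw [if_pos (Or.inl hx)]
      rw [h1, if_neg (by simp [hx])]
      exact ih s
    · rw [if_pos (by simpa using hx)]
      by_cases hc : PySem.Set.contains s (PySem.Str.strip (if raw = "" then "" else raw)) = true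
      · have hm : PySem.Str.strip (if raw = "" then "" else raw) ∈ s := by simpa using hc
        have h1 : stepA (s, s) raw = (s, s) := by
          simp only [stepA]; rw [if_pos (Or.inr hc)]
        have hadd : PySem.Set.add s (PySem.Str.strip (if raw = "" then "" else raw)) = s := by
          simp [PySem.Set.add, hm]
        rw [h1, List.foldl_cons, hadd]
        exact ih s
      · have hm : PySem.Str.strip (if raw = "" then "" else raw) ∉ s := by simpa using hc
        have hadd : PySem.Set.add s (PySem.Str.strip (if raw = "" then "" else raw))
            = s ++ [PySem.Str.strip (if raw = "" then "" else raw)] := by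
          simp [PySem.Set.add, hm]
        have h1 : stepA (s, s) raw
            = (s ++ [PySem.Str.strip (if raw = "" then "" else raw)],
               s ++ [PySem.Str.strip (if raw = "" then "" else raw)]) := by
          simp only [stepA]; rw [if_neg (not_or.mpr ⟨hx, by simpa using hm⟩), hadd]
        rw [h1, List.foldl_cons, hadd]
        exact ih _

-- B's collapse loop writes out exactly destutter (· ≠ ·)
theorem foldB_eq' (l : List String) (p : String) (out : List String) :
    (l.foldl (fun (st : List String × Option String) x =>
        if some x ≠ st.2 then (st.1 ++ [x], some x) else st) (out ++ [p], some p)).1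
    = out ++ l.destutter' (· ≠ ·) p := by
  induction l generalizing p out with
  | nil => simp
  | cons x r ih =>
    rw [List.foldl_cons]
    by_cases hxp : x = p
    · subst hxp
      rw [if_neg (by simp), List.destutter'_cons_neg r (show ¬ (x ≠ x) by simp)]
      exact ih x out
    · rw [if_pos (by simp [hxp]), List.destutter'_cons_pos r (Ne.symm hxp)]
      have h := ih x (out ++ [p])
      simp only [List.append_assoc, List.cons_append, List.nil_append] at h ⊢
      exact h

theorem foldB_eq (l : List String) :
    (l.foldl (fun (st : List String × Option String) x =>
        if some x ≠ st.2 then (st.1 ++ [x], some x) else st) (([] : List String), none)).1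
    = l.destutter (· ≠ ·) := by
  cases l with
  | nil => rfl
  | cons a t =>
    have h := foldB_eq' t a []
    simp only [List.nil_append] at h
    simp only [List.foldl_cons, List.destutter_cons']
    rw [if_pos (by simp)]
    exact h

-- the central fact: sorting the deduplicated list = sorting everything and collapsing runs
theorem sorted_ofList_eq_destutter_sorted (cl : List String) :
    PySem.List.sorted (PySem.Set.ofList cl) tierKey false
    = (PySem.List.sorted cl tierKey false).destutter (· ≠ ·) := by
  set S := PySem.List.sorted cl tierKey false with hS
  have hP : S.Pairwise (fun a b => tierKey a ≤ tierKey b) := PySem.List.sorted_pairwise cl tierKey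
  haveI : Std.Antisymm (fun a b : String => tierKey a ≤ tierKey b) :=
    ⟨fun a b h1 h2 => tierKey_injective (le_antisymm h1 h2)⟩
  have hD : S.destutter (· ≠ ·) = S.dedup := hP.destutter_eq_dedup
  have hnodup : (S.destutter (· ≠ ·)).Nodup := by rw [hD]; exact S.nodup_dedup
  have hmem : ∀ x, x ∈ S.destutter (· ≠ ·) ↔ x ∈ PySem.Set.ofList cl := by
    intro x
    rw [hD, List.mem_dedup, hS, PySem.List.mem_sorted, PySem.Set.mem_ofList]
  apply PySem.List.sorted_eq_of_perm_of_pairwise_lt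
  · exact (List.perm_ext_iff_of_nodup hnodup (PySem.Set.nodup_ofList cl)).mpr hmem
  · have hle : (S.destutter (· ≠ ·)).Pairwise (fun a b => tierKey a ≤ tierKey b) := by
      rw [hD]; exact hP.sublist S.dedup_sublist
    have hne : (S.destutter (· ≠ ·)).Pairwise (fun a b : String => a ≠ b) := hnodup
    exact (hle.and hne).imp (fun {a b} h =>
      lt_of_le_of_ne h.1 (fun hk => h.2 (tierKey_injective hk)))

-- ===== VERDICT (by name: the statement is the Claim_ definition above) =====
theorem compress_slash_spec : Claim_equal_compress_slash := by
  intro labels _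
  show compress_slash labels = compress_slash_alt labels
  unfold compress_slash compress_slash_alt
  rw [show (PySem.Set.empty : PySem.Set String) = ([] : List String) from rfl]
  rw [foldA_eq labels []]
  simp only [foldB_eq]
  rw [← PySem.Set.ofList_eq_foldl]
  rw [sorted_ofList_eq_destutter_sorted]
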